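-- pv_equiv track=rewrite | github.com/felipebarte/cnab | teste-py/validador_codigos_barras.py | encontrar_sequencias_numericas
-- ===== SOURCE A (Python) =====
-- def encontrar_sequencias_numericas(texto, min_length, max_length=None):
--     """
--     Encontra sequências de dígitos de um tamanho específico
--     """
--     if max_length is None:
--         max_length = min_length
--
--     sequencias = []
--     i = 0
--     while i < len(texto):
--         if texto[i].isdigit():
--             # Início de uma sequência numérica
--             j = i
--             while j < len(texto) and texto[j].isdigit():
--                 j += 1
--
--             # Tamanho da sequência encontrada
--             tamanho = j - i
--             if min_length <= tamanho <= max_length: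
--                 sequencias.append(texto[i:j])
--
--             i = j
--         else:
--             i += 1
--
--     return sequencias
-- ===== SOURCE B (Python) =====
-- def encontrar_sequencias_numericas(texto, min_length, max_length=None):
--     if max_length is None:
--         max_length = min_length
--     marcado = ''.join(c if c.isdigit() else ' ' for c in texto)
--     return [run for run in marcado.split()
--             if min_length <= len(run) <= max_length]
-- ===== Notes on version B (the rewrite author's own statement) =====
-- stated objective: idiomatic
-- what changed: Replaces A's two-index run-scanning while-loop with a staged mark-then-split pipeline: every non-digit character is first mapped to a space, the marked string is tokenized with str.split(), and the tokens of admissible length are kept; B itself contains no run-tracking loop or index bookkeeping.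
import Mathlib
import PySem

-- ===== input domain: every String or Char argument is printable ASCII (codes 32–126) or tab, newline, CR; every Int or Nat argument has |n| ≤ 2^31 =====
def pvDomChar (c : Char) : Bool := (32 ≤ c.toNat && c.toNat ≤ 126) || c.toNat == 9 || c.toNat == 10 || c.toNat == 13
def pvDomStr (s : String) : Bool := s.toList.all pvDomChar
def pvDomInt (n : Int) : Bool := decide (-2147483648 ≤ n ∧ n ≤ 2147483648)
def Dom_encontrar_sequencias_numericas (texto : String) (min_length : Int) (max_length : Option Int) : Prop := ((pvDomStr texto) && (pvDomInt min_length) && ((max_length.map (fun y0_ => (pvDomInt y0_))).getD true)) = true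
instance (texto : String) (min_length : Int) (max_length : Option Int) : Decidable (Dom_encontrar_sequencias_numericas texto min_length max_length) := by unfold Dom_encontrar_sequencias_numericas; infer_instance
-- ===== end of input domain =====

-- B replaces A's two-index run-scanning loop with a mark-then-split pipeline (map non-digits to spaces, str.split(), filter by length); objective: idiomatic, same cost.

-- ===== PORT A =====
-- A's outer while over i / inner while over j, as recursion on the remaining suffix of the
-- character list: the inner while advancing j over digits yields the digit prefix, the slice
-- texto[i:j] is that prefix, and i = j resumes after it.
def pvALoop (mn mx : Int) : List Char → List String
  | [] => []
  | c :: rest =>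
    if PySem.Chars.isdigit c then
      let run := c :: rest.takeWhile PySem.Chars.isdigit
      (if mn ≤ (run.length : Int) ∧ (run.length : Int) ≤ mx then [String.ofList run] else [])
        ++ pvALoop mn mx (rest.dropWhile PySem.Chars.isdigit)
    else pvALoop mn mx rest
termination_by l => l.length
decreasing_by
  · have := List.length_dropWhile_le (p := PySem.Chars.isdigit) (l := rest); simp; omega
  · simp

def encontrar_sequencias_numericas (texto : String) (min_length : Int) (max_length : Option Int) : List String :=
  -- if max_length is None: max_length = min_length
  pvALoop min_length (max_length.getD min_length) texto.toList

-- ===== PORT B =====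
def encontrar_sequencias_numericas_alt (texto : String) (min_length : Int) (max_length : Option Int) : List String :=
  let mx := max_length.getD min_length
  -- marcado = ''.join(c if c.isdigit() else ' ' for c in texto)
  let marcado := String.ofList (texto.toList.map (fun c => if PySem.Chars.isdigit c then c else ' '))
  -- [run for run in marcado.split() if min_length <= len(run) <= max_length]
  (PySem.Str.split₀ marcado).filter
    (fun run => decide (min_length ≤ PySem.Str.len run ∧ PySem.Str.len run ≤ mx))

-- ===== PRECONDITION & SPEC =====
def Spec_encontrar_sequencias_numericas (texto : String) (min_length : Int) (max_length : Option Int) (out : List String) : Prop := out = encontrar_sequencias_numericas_alt texto min_length max_length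
instance (texto : String) (min_length : Int) (max_length : Option Int) (out : List String) : Decidable (Spec_encontrar_sequencias_numericas texto min_length max_length out) := by unfold Spec_encontrar_sequencias_numericas; infer_instance

-- ===== CLAIM (what is proved, stated in full; the proofs are below) =====
def Claim_equal_encontrar_sequencias_numericas : Prop := ∀ (texto : String) (min_length : Int) (max_length : Option Int), Dom_encontrar_sequencias_numericas texto min_length max_length → Spec_encontrar_sequencias_numericas texto min_length max_length (encontrar_sequencias_numericas texto min_length max_length)

-- ===== LEMMAS AND PROOFS =====

-- recursive characterisation of whitespace tokenisation, used to reason about split₀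
def pvW : List Char → List (List Char)
  | [] => []
  | c :: rest =>
    if PySem.Chars.isspace c then pvW rest
    else (c :: rest.takeWhile (fun x => !PySem.Chars.isspace x)) ::
      pvW (rest.dropWhile (fun x => !PySem.Chars.isspace x))
termination_by l => l.length
decreasing_by
  · simp
  · have := List.length_dropWhile_le (p := fun x => !PySem.Chars.isspace x) (l := rest)
    simp; omega

theorem pvGo_eq_pvW (n : Nat) : ∀ (l cur : List Char) (acc : List (List Char)), l.length ≤ n →
    PySem.Chars.split₀.go l cur acc =
      acc.reverse ++
        (if cur.isEmpty then pvW l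
         else (cur.reverse ++ l.takeWhile (fun x => !PySem.Chars.isspace x)) ::
           pvW (l.dropWhile (fun x => !PySem.Chars.isspace x))) := by
  induction n with
  | zero =>
    intro l cur acc hl
    cases l with
    | nil =>
      cases cur <;> simp [PySem.Chars.split₀.go, pvW]
    | cons c t => simp at hl
  | succ n ih =>
    intro l cur acc hl
    cases l with
    | nil =>
      cases cur <;> simp [PySem.Chars.split₀.go, pvW]
    | cons c t =>
      simp only [List.length_cons] at hl
      by_cases hs : PySem.Chars.isspace c
      · rw [show PySem.Chars.split₀.go (c :: t) cur acc =
              (if cur.isEmpty then PySem.Chars.split₀.go t [] acc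
               else PySem.Chars.split₀.go t [] (cur.reverse :: acc)) from by
            rw [PySem.Chars.split₀.go]; simp [hs]]
        cases cur with
        | nil =>
          rw [ih t [] acc (by omega)]
          simp [pvW, hs]
        | cons d ds =>
          rw [ih t [] ((d :: ds).reverse :: acc) (by omega)]
          simp [pvW, hs, List.takeWhile, List.dropWhile]
      · rw [show PySem.Chars.split₀.go (c :: t) cur acc =
              PySem.Chars.split₀.go t (c :: cur) acc from by
            rw [PySem.Chars.split₀.go]; simp [hs]]
        rw [ih t (c :: cur) acc (by omega)]
        cases cur with
        | nil => simp [pvW, hs, List.takeWhile, List.dropWhile]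
        | cons d ds => simp [pvW, hs, List.takeWhile, List.dropWhile]

theorem pvSplit₀_eq_pvW (l : List Char) : PySem.Chars.split₀ l = pvW l := by
  have := pvGo_eq_pvW l.length l [] [] le_rfl
  simpa [PySem.Chars.split₀] using this

theorem pvDigit_not_space {c : Char} (h : PySem.Chars.isdigit c = true) :
    PySem.Chars.isspace c = false := by
  simp only [PySem.Chars.isdigit, Bool.and_eq_true, decide_eq_true_eq, Char.le_def,
    UInt32.le_iff_toNat_le] at h
  simp only [PySem.Chars.isspace, Bool.or_eq_false_iff, Bool.and_eq_false_iff,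
    decide_eq_false_iff_not]
  have hv : c.toNat = c.val.toNat := rfl
  have h0 : ('0').val.toNat = 48 := rfl
  have h9 : ('9').val.toNat = 57 := rfl
  rw [hv]
  rw [h0, h9] at h
  omega

-- the character mark: digits stay, everything else becomes a space
theorem pvNotSpace_mark (c : Char) :
    (!PySem.Chars.isspace (if PySem.Chars.isdigit c then c else ' ')) = PySem.Chars.isdigit c := by
  by_cases h : PySem.Chars.isdigit c
  · simp [h, pvDigit_not_space h]
  · simp [h]; decide

-- prepend-or-skip of the head run equals filtering it, when the boolean test decides the Prop
theorem pvFilterCons (p : String → Bool) (x : String) (L : List String) (P : Prop)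
    [Decidable P] (hpe : p x = decide P) :
    (x :: L).filter p = (if P then [x] else []) ++ L.filter p := by
  by_cases hP : P <;> simp [hpe, hP]

theorem pvALoop_eq_filter_pvW (mn mx : Int) (n : Nat) : ∀ (l : List Char), l.length ≤ n →
    pvALoop mn mx l =
      ((pvW (l.map (fun c => if PySem.Chars.isdigit c then c else ' '))).map String.ofList).filter
        (fun run => decide (mn ≤ PySem.Str.len run ∧ PySem.Str.len run ≤ mx)) := by
  induction n with
  | zero =>
    intro l hl
    cases l with
    | nil => simp [pvALoop, pvW]
    | cons c t => simp at hl
  | succ n ih =>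
    intro l hl
    cases l with
    | nil => simp [pvALoop, pvW]
    | cons c rest =>
      simp only [List.length_cons] at hl
      set mark := fun c => if PySem.Chars.isdigit c then c else ' ' with hmark
      have hpred : ((fun x => !PySem.Chars.isspace x) ∘ mark) = PySem.Chars.isdigit := by
        funext x; simpa [hmark] using pvNotSpace_mark x
      have htk : (rest.map mark).takeWhile (fun x => !PySem.Chars.isspace x)
          = rest.takeWhile PySem.Chars.isdigit := by
        rw [List.takeWhile_map, hpred]
        conv_rhs => rw [← List.map_id (rest.takeWhile PySem.Chars.isdigit)]
        refine List.map_congr_left (fun x hx => ?_)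
        have := List.mem_takeWhile_imp hx
        simp [hmark, this]
      have hdk : (rest.map mark).dropWhile (fun x => !PySem.Chars.isspace x)
          = (rest.dropWhile PySem.Chars.isdigit).map mark := by
        rw [List.dropWhile_map, hpred]
      by_cases h : PySem.Chars.isdigit c
      · rw [pvALoop]
        have hns := pvDigit_not_space h
        rw [show (c :: rest).map mark = c :: rest.map mark from by simp [hmark, h]]
        rw [pvW]
        simp only [hns, Bool.false_eq_true, if_false, htk, hdk]
        have hlen := List.length_dropWhile_le (p := PySem.Chars.isdigit) (l := rest)
        rw [ih (rest.dropWhile PySem.Chars.isdigit) (by omega)]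
        simp only [h, if_true, List.map_cons]
        rw [← pvFilterCons _ _ _ _ (by simp [PySem.Str.len_eq])]
      · rw [pvALoop]
        simp only [h, Bool.false_eq_true, if_false]
        rw [show (c :: rest).map mark = ' ' :: rest.map mark from by simp [hmark, h]]
        rw [pvW]
        rw [if_pos (by decide)]
        exact ih rest (by omega)

-- ===== VERDICT (by name: the statement is the Claim_ definition above) =====
theorem encontrar_sequencias_numericas_spec : Claim_equal_encontrar_sequencias_numericas := by
  intro texto mn mxo _
  unfold Spec_encontrar_sequencias_numericas encontrar_sequencias_numericas
    encontrar_sequencias_numericas_alt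
  simp only [PySem.Str.split₀]
  rw [show (String.ofList ((texto.toList).map (fun c => if PySem.Chars.isdigit c then c else ' '))).toList
        = (texto.toList).map (fun c => if PySem.Chars.isdigit c then c else ' ') from by simp]
  rw [pvSplit₀_eq_pvW]
  exact pvALoop_eq_filter_pvW mn (mxo.getD mn) texto.toList.length texto.toList le_rfl
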